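-- pv_equiv track=rewrite | github.com/yofn/pyacm | codeforces/graph图论/1100/1324C青蛙跳.py | minD
-- ===== SOURCE A (Python) =====
-- def minD(s):    #2e5, sum<2e5; O(n) is enough!?
--     p =-1
--     m = 0
--     s = s + 'R' #trick
--     for i in range(len(s)):
--         if s[i]=='R':
--             if i-p>m:
--                 m=i-p
--             p = i
--     return m
-- ===== SOURCE B (Python) =====
-- def minD(s):
--     # The max gap between consecutive 'R's (with the -1 / len(s) sentinels)
--     # equals the longest run of non-'R' characters, plus one.
--     return max(map(len, s.split('R'))) + 1
-- ===== Notes on version B (the rewrite author's own statement) =====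
-- stated objective: simpler
-- what changed: B reformulates the problem: the maximal jump equals the longest run of non-'R' characters plus one, so it splits s on 'R' and returns max segment length + 1 -- no index scan, no previous-position/running-max state, no appended 'R' trick.
import Mathlib
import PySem

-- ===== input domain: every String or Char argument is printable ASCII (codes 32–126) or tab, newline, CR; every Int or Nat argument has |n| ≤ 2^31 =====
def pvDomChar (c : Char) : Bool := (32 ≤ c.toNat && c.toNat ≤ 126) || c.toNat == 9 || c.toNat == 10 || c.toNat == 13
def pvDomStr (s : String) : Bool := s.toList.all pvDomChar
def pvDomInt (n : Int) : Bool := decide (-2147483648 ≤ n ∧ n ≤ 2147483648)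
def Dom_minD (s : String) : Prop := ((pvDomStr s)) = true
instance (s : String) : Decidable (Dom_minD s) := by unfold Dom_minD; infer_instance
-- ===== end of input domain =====

-- B reformulates the problem: the maximal jump equals the longest run of
-- non-'R' characters plus one, so it splits on 'R' and takes the max segment
-- length + 1; A scans indices with previous-R/running-max state over s + 'R'.

-- ===== PORT A =====
-- the for-loop over range(len(s+'R')) with state p, m (index carried as Int)
def minDLoop : List Char → Int → Int → Int → Int
  | [], _, _, m => m
  | c :: cs, i, p, m =>
    if c = 'R' then minDLoop cs (i + 1) i (if i - p > m then i - p else m)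
    else minDLoop cs (i + 1) p m

def minD (s : String) : Int :=
  minDLoop (s.toList ++ ['R']) 0 (-1) 0

-- ===== PORT B =====
-- s.split('R') ported as PySem.Chars.splitOn (Python's str.split, sep ≠ '')
def minD_alt (s : String) : Int :=
  let lens := (PySem.Chars.splitOn s.toList ['R']).map (fun t => (t.length : Int))
  (match lens with
   | [] => 0          -- unreachable: split always yields at least one piece
   | g :: gs => gs.foldl max g) + 1

-- ===== PRECONDITION & SPEC =====
def Spec_minD (s : String) (out : Int) : Prop := out = minD_alt s
instance (s : String) (out : Int) : Decidable (Spec_minD s out) := by unfold Spec_minD; infer_instance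

-- ===== CLAIM =====
def Claim_equal_minD : Prop := ∀ (s : String), Dom_minD s → Spec_minD s (minD s)

-- ===== LEMMAS AND PROOFS =====

-- natural structural recursion computing split-on-one-char
def mySplit (r : Char) : List Char → List (List Char)
  | [] => [[]]
  | c :: cs =>
    if c = r then [] :: mySplit r cs
    else match mySplit r cs with
      | [] => [[c]]          -- unreachable
      | t :: ts => (c :: t) :: ts

theorem mySplit_ne_nil (r : Char) (l : List Char) : mySplit r l ≠ [] := by
  cases l with
  | nil => simp [mySplit]
  | cons c cs =>
    simp only [mySplit]
    split_ifs
    · simp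
    · cases h : mySplit r cs <;> simp

-- splitOn.go with enough fuel, general accumulators
theorem go_eq_mySplit (r : Char) :
    ∀ (fuel : Nat) (l : List Char), l.length < fuel → ∀ (cur : List Char) (acc : List (List Char)),
      PySem.Chars.splitOn.go [r] fuel l cur acc =
        acc.reverse ++ (match mySplit r l with
          | [] => [cur.reverse]        -- unreachable
          | t :: ts => (cur.reverse ++ t) :: ts) := by
  intro fuel
  induction fuel with
  | zero => intro l h; omega
  | succ f ih =>
    intro l h cur acc
    cases l with
    | nil =>
      simp [PySem.Chars.splitOn.go, mySplit]
    | cons c rest =>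
      rw [PySem.Chars.splitOn.go]
      have hpre : [r].isPrefixOf (c :: rest) = (r == c) := by
        simp [List.isPrefixOf]
      by_cases hc : c = r
      · simp only [hc, List.length_singleton, List.drop_succ_cons, List.drop_zero]
        rw [ih rest (by simp at h; omega) [] (cur.reverse :: acc)]
        have := mySplit_ne_nil r rest
        cases hms : mySplit r rest with
        | nil => exact absurd hms this
        | cons t ts =>
          simp [mySplit, hms]
      · have : (r == c) = false := by simp; exact fun e => hc e.symm
        simp only [hpre, this]
        rw [ih rest (by simp at h; omega) (c :: cur) acc]
        have := mySplit_ne_nil r rest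
        cases hms : mySplit r rest with
        | nil => exact absurd hms this
        | cons t ts =>
          simp [mySplit, hms, hc]

theorem splitOn_eq_mySplit (r : Char) (l : List Char) :
    PySem.Chars.splitOn l [r] = mySplit r l := by
  unfold PySem.Chars.splitOn
  rw [go_eq_mySplit r (l.length + 1) l (by omega) [] []]
  have := mySplit_ne_nil r l
  cases hms : mySplit r l with
  | nil => exact absurd hms this
  | cons t ts => simp

-- max of (d + first segment length) and the other segment lengths
def maxFirst (d : Int) : List (List Char) → Int
  | [] => d                    -- unreachable
  | t :: ts => (ts.map (fun u => (u.length : Int))).foldl max (d + t.length)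

theorem foldl_max_max (a b : Int) (l : List Int) :
    l.foldl max (max a b) = max a (l.foldl max b) := by
  induction l generalizing b with
  | nil => simp
  | cons x xs ih => simp only [List.foldl_cons, max_assoc]; exact ih (max b x)

theorem foldl_max_le_init (a : Int) (l : List Int) : a ≤ l.foldl max a := by
  induction l generalizing a with
  | nil => simp
  | cons x xs ih => exact le_trans (le_max_left a x) (ih (max a x))

-- A's loop = max of carried m and (maxFirst (i-p-1) of the split) + 1
theorem loop_eq_maxFirst (cs : List Char) :
    ∀ (i p m : Int), minDLoop (cs ++ ['R']) i p m = max m (maxFirst (i - p - 1) (mySplit 'R' cs) + 1) := by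
  induction cs with
  | nil =>
    intro i p m
    simp only [List.nil_append, minDLoop, mySplit, maxFirst, List.map_nil, List.foldl_nil,
      List.length_nil, Nat.cast_zero, add_zero]
    rw [max_def]; split_ifs <;> omega
  | cons c cs ih =>
    intro i p m
    by_cases hc : c = 'R'
    · simp only [hc, List.cons_append, minDLoop, if_true]
      rw [ih (i + 1) i]
      have hms := mySplit_ne_nil 'R' cs
      cases hms' : mySplit 'R' cs with
      | nil => exact absurd hms' hms
      | cons t ts =>
        simp only [mySplit, hms', maxFirst, List.map_cons, List.foldl_cons, if_true]
        have h1 : (i - p - 1) + (List.length ([] : List Char) : Int) = i - p - 1 := by simp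
        have h2 : i + 1 - i - 1 = (0 : Int) := by ring
        rw [h1, h2]
        have hfold : (ts.map (fun u => (u.length : Int))).foldl max (max (i - p - 1) (t.length : Int))
            = max (i - p - 1) ((ts.map (fun u => (u.length : Int))).foldl max (t.length : Int)) :=
          foldl_max_max _ _ _
        have h0 : (0 : Int) + (t.length : Int) = (t.length : Int) := by ring
        rw [hfold, h0]
        have hAB : (if i - p > m then i - p else m) = max m (i - p) := by
          rw [max_def]; split_ifs <;> omega
        rw [hAB]
        rw [max_def, max_def, max_def, max_def] ; split_ifs <;> omega
    · simp only [List.cons_append, minDLoop, if_neg hc]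
      rw [ih (i + 1) p]
      have hms := mySplit_ne_nil 'R' cs
      cases hms' : mySplit 'R' cs with
      | nil => exact absurd hms' hms
      | cons t ts =>
        simp only [mySplit, if_neg hc, hms', maxFirst, List.length_cons]
        have : i + 1 - p - 1 + (t.length : Int) = i - p - 1 + ((t.length : Nat) + 1 : Nat) := by
          push_cast; ring
        rw [this]

theorem minD_eq_alt (s : String) : minD s = minD_alt s := by
  unfold minD minD_alt
  rw [loop_eq_maxFirst, splitOn_eq_mySplit]
  have hms := mySplit_ne_nil 'R' s.toList
  cases hms' : mySplit 'R' s.toList with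
  | nil => exact absurd hms' hms
  | cons t ts =>
    simp only [maxFirst, List.map_cons]
    have h0 : (0 : Int) - (-1) - 1 = 0 := by ring
    have h0' : (0 : Int) + (t.length : Int) = (t.length : Int) := by ring
    rw [h0, h0']
    have hnn : (0 : Int) ≤ (ts.map (fun u => (u.length : Int))).foldl max (t.length : Int) :=
      le_trans (by positivity) (foldl_max_le_init _ _)
    omega

-- ===== VERDICT =====
theorem minD_spec : Claim_equal_minD := by
  intro s _
  exact minD_eq_alt s
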